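-- pv_equiv track=rewrite | github.com/afnan1992/Toronto-real-estate-project | dags/src/Transform.py | WrangleAppliances
-- ===== SOURCE A (Python) =====
-- def WrangleAppliances(item):
--     try:
--         if len(item['Appliances']) > 0:
--             for appliance in item['Appliances']:
--                 if appliance == 'Laundry (In Building)':
--                     item['Laundry_in_bulding'] = 'Yes'
--                 elif appliance == 'Laundry (In Unit)':
--                     item['Laundry_in_unit'] = 'Yes'
--                 elif appliance == 'Dishwasher':
--                     item['Dishwasher'] = 'Yes'
--                 elif appliance == 'Fridge / Freezer':
--                     item['Fridge_Freezer'] = 'Yes'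
--
--
--         if 'Laundry_in_bulding' not in item:
--             item['Laundry_in_bulding'] = 'No'
--
--         if 'Laundry_in_unit' not in item:
--             item['Laundry_in_unit'] = 'No'
--
--         if 'Dishwasher' not in item:
--             item['Dishwasher'] ='No'
--
--         if 'Fridge_Freezer' not in item:
--             item['Fridge_Freezer'] = 'No'
--     except KeyError as ke:
--         item['Laundry_in_bulding'] = 'No'
--         item['Laundry_in_unit'] = 'No'
--         item['Dishwasher'] ='No'
--         item['Fridge_Freezer'] = 'No'
--
--
--     return item['Laundry_in_bulding'],item['Laundry_in_unit'],item['Dishwasher'],item['Fridge_Freezer']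
-- ===== SOURCE B (Python) =====
-- def WrangleAppliances(item):
--     # Return-value equivalent to A; mutates item too, but insertion order /
--     # overwrite behaviour of the mutation may differ from A's.
--     PAIRS = (('Laundry (In Building)', 'Laundry_in_bulding'),
--              ('Laundry (In Unit)', 'Laundry_in_unit'),
--              ('Dishwasher', 'Dishwasher'),
--              ('Fridge / Freezer', 'Fridge_Freezer'))
--     try:
--         present = item['Appliances']
--         flags = tuple('Yes' if name in present else 'No' for name, _ in PAIRS)
--     except KeyError:
--         flags = ('No', 'No', 'No', 'No')
--     for (_, key), value in zip(PAIRS, flags):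
--         item[key] = value
--     return flags
-- ===== Notes on version B (the rewrite author's own statement) =====
-- stated objective: idiomatic
-- what changed: Replaced A's if/elif dispatch loop over the appliance list plus four conditional dict read-backs with a single name->flag table: B looks each of the four appliance names up in the list once and builds the result tuple directly, never reading the flags back out of the dict.
import Mathlib
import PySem

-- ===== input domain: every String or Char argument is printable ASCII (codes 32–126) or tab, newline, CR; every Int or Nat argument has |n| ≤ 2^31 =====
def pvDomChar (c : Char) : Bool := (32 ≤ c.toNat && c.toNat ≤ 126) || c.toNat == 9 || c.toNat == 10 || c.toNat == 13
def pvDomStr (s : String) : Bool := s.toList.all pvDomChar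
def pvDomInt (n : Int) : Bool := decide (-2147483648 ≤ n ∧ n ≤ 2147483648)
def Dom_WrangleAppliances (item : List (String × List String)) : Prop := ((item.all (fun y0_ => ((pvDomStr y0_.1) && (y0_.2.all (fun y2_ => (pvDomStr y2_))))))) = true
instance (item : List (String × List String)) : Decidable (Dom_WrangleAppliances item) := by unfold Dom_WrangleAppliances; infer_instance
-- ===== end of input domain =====

-- B replaces A's if/elif dispatch loop and conditional dict read-backs with a direct
-- name->flag lookup table (idiomatic, same cost). Equivalence is about the RETURN value
-- only: both Pythons mutate `item`, but not necessarily in the same insertion order.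


-- ===== PORT A =====
-- The string-valued flag entries A writes into `item` are modelled as an overlay dict
-- `f : PySem.Dict String String` (the input dict's value type List String cannot hold
-- the strings A writes); `key in item` after mutation = key in the original item or in
-- the overlay, and the final reads item[k] come from the overlay (Pre_ guarantees the
-- flag keys are not in the original item whenever 'Appliances' is, so the value read is
-- the overlay's; getD's "" default is never reached under Pre_).
def waStep (f : PySem.Dict String String) (a : String) : PySem.Dict String String :=
  if a = "Laundry (In Building)" then f.insert "Laundry_in_bulding" "Yes"
  else if a = "Laundry (In Unit)" then f.insert "Laundry_in_unit" "Yes"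
  else if a = "Dishwasher" then f.insert "Dishwasher" "Yes"
  else if a = "Fridge / Freezer" then f.insert "Fridge_Freezer" "Yes"
  else f

def WrangleAppliances (item : List (String × List String)) : String × String × String × String :=
  let d := PySem.Dict.ofList item
  match d.get? "Appliances" with
  | none =>  -- except KeyError: all four set to 'No' unconditionally, then returned
      ("No", "No", "No", "No")
  | some apps =>
      let f0 : PySem.Dict String String := PySem.Dict.empty
      let f1 := if apps.length > 0 then apps.foldl waStep f0 else f0
      let inItem := fun (f : PySem.Dict String String) (k : String) =>
        d.contains k || f.contains k
      let f2 := if inItem f1 "Laundry_in_bulding" then f1 else f1.insert "Laundry_in_bulding" "No"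
      let f3 := if inItem f2 "Laundry_in_unit" then f2 else f2.insert "Laundry_in_unit" "No"
      let f4 := if inItem f3 "Dishwasher" then f3 else f3.insert "Dishwasher" "No"
      let f5 := if inItem f4 "Fridge_Freezer" then f4 else f4.insert "Fridge_Freezer" "No"
      (f5.getD "Laundry_in_bulding" "", f5.getD "Laundry_in_unit" "",
       f5.getD "Dishwasher" "", f5.getD "Fridge_Freezer" "")

-- ===== PORT B =====
def WrangleAppliances_alt (item : List (String × List String)) : String × String × String × String :=
  match (PySem.Dict.ofList item).get? "Appliances" with
  | none => ("No", "No", "No", "No")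
  | some present =>
      let flag := fun (name : String) => if present.contains name then "Yes" else "No"
      (flag "Laundry (In Building)", flag "Laundry (In Unit)",
       flag "Dishwasher", flag "Fridge / Freezer")

-- ===== PRECONDITION & SPEC =====
-- Pre_ excludes items that contain the key 'Appliances' together with one of the four
-- flag keys: there A returns that key's pre-existing list value inside the tuple, which
-- is not a value of the declared (str, str, str, str) result type.
def Pre_WrangleAppliances (item : List (String × List String)) : Prop :=
  (PySem.Dict.ofList item).contains "Appliances" = true →
    ((PySem.Dict.ofList item).contains "Laundry_in_bulding" = false ∧
     (PySem.Dict.ofList item).contains "Laundry_in_unit" = false ∧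
     (PySem.Dict.ofList item).contains "Dishwasher" = false ∧
     (PySem.Dict.ofList item).contains "Fridge_Freezer" = false)
instance (item : List (String × List String)) : Decidable (Pre_WrangleAppliances item) := by
  unfold Pre_WrangleAppliances; infer_instance

def pvWitness_WrangleAppliances : (List (String × List String)) :=
  [("Appliances", ["Dishwasher", "Fridge / Freezer"])]

def Spec_WrangleAppliances (item : List (String × List String)) (out : String × String × String × String) : Prop := out = WrangleAppliances_alt item
instance (item : List (String × List String)) (out : String × String × String × String) : Decidable (Spec_WrangleAppliances item out) := by unfold Spec_WrangleAppliances; infer_instance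

-- ===== CLAIM (what is proved, stated in full; the proofs are below) =====
def Claim_equal_WrangleAppliances : Prop := ∀ (item : List (String × List String)), Dom_WrangleAppliances item → Pre_WrangleAppliances item → Spec_WrangleAppliances item (WrangleAppliances item)

-- ===== LEMMAS AND PROOFS =====

-- the fold over the appliance list writes exactly the flags whose appliance name occurs
theorem waFold_get?_of (name key : String)
    (hyes : ∀ f : PySem.Dict String String, (waStep f name).get? key = some "Yes")
    (hne : ∀ (f : PySem.Dict String String) (a : String), a ≠ name → (waStep f a).get? key = f.get? key)
    (apps : List String) (f : PySem.Dict String String) :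
    (apps.foldl waStep f).get? key = if name ∈ apps then some "Yes" else f.get? key := by
  induction apps generalizing f with
  | nil => simp
  | cons a t ih =>
    simp only [List.foldl_cons, List.mem_cons]
    rw [ih]
    by_cases ha : a = name
    · subst ha
      rw [hyes]
      simp
    · rw [hne f a ha]
      have : (name = a ∨ name ∈ t) ↔ name ∈ t := by
        constructor
        · rintro (rfl | hm)
          · exact absurd rfl ha
          · exact hm
        · exact Or.inr
      rw [if_congr this rfl rfl]

theorem waFold_lb (apps : List String) (f : PySem.Dict String String) :
    (apps.foldl waStep f).get? "Laundry_in_bulding" =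
      if "Laundry (In Building)" ∈ apps then some "Yes" else f.get? "Laundry_in_bulding" := by
  apply waFold_get?_of
  · intro f; simp [waStep, PySem.Dict.get?_insert_self]
  · intro f a ha
    simp only [waStep]
    split_ifs with h1 h2 h3 _h4 <;>
      first
        | (exact absurd h1 ha)
        | (exact absurd h2 ha)
        | (exact absurd h3 ha)
        | (exact absurd _h4 ha)
        | (simp [PySem.Dict.get?_insert])

theorem waFold_lu (apps : List String) (f : PySem.Dict String String) :
    (apps.foldl waStep f).get? "Laundry_in_unit" =
      if "Laundry (In Unit)" ∈ apps then some "Yes" else f.get? "Laundry_in_unit" := by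
  apply waFold_get?_of
  · intro f; simp [waStep, PySem.Dict.get?_insert_self]
  · intro f a ha
    simp only [waStep]
    split_ifs with h1 h2 h3 _h4 <;>
      first
        | (exact absurd h1 ha)
        | (exact absurd h2 ha)
        | (exact absurd h3 ha)
        | (exact absurd _h4 ha)
        | (simp [PySem.Dict.get?_insert])

theorem waFold_dw (apps : List String) (f : PySem.Dict String String) :
    (apps.foldl waStep f).get? "Dishwasher" =
      if "Dishwasher" ∈ apps then some "Yes" else f.get? "Dishwasher" := by
  apply waFold_get?_of
  · intro f; simp [waStep, PySem.Dict.get?_insert_self]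
  · intro f a ha
    simp only [waStep]
    split_ifs with h1 h2 h3 _h4 <;>
      first
        | (exact absurd h1 ha)
        | (exact absurd h2 ha)
        | (exact absurd h3 ha)
        | (exact absurd _h4 ha)
        | (simp [PySem.Dict.get?_insert])

theorem waFold_ff (apps : List String) (f : PySem.Dict String String) :
    (apps.foldl waStep f).get? "Fridge_Freezer" =
      if "Fridge / Freezer" ∈ apps then some "Yes" else f.get? "Fridge_Freezer" := by
  apply waFold_get?_of
  · intro f; simp [waStep, PySem.Dict.get?_insert_self]
  · intro f a ha
    simp only [waStep]
    split_ifs with h1 h2 h3 _h4 <;>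
      first
        | (exact absurd h1 ha)
        | (exact absurd h2 ha)
        | (exact absurd h3 ha)
        | (exact absurd _h4 ha)
        | (simp [PySem.Dict.get?_insert])

-- contains as definedness of get? (bridge used by the main proof)
theorem waContains_eq (d : PySem.Dict String String) (k : String) :
    d.contains k = (d.get? k).isSome := by
  rcases h : d.get? k with _ | v
  · rw [PySem.Dict.get?_eq_none_iff_contains] at h
    simp [h]
  · rcases hc : d.contains k with _ | _
    · rw [← PySem.Dict.get?_eq_none_iff_contains] at hc
      rw [h] at hc
      cases hc
    · simp

theorem WrangleAppliances_spec : Claim_equal_WrangleAppliances := by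
  intro item _ hpre
  unfold Spec_WrangleAppliances WrangleAppliances WrangleAppliances_alt
  cases hget : (PySem.Dict.ofList item).get? "Appliances" with
  | none => simp [hget]
  | some apps =>
    have hcont : (PySem.Dict.ofList item).contains "Appliances" = true := by
      rcases hc : (PySem.Dict.ofList item).contains "Appliances" with _ | _
      · rw [← PySem.Dict.get?_eq_none_iff_contains] at hc
        rw [hget] at hc
        cases hc
      · rfl
    obtain ⟨h1, h2, h3, h4⟩ := hpre hcont
    have hlen : (if apps.length > 0 then apps.foldl waStep PySem.Dict.empty else PySem.Dict.empty)
        = apps.foldl waStep PySem.Dict.empty := by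
      cases apps <;> simp
    by_cases m1 : "Laundry (In Building)" ∈ apps <;>
      by_cases m2 : "Laundry (In Unit)" ∈ apps <;>
        by_cases m3 : "Dishwasher" ∈ apps <;>
          by_cases m4 : "Fridge / Freezer" ∈ apps <;>
            simp [hget, hlen, h1, h2, h3, h4, m1, m2, m3, m4, waContains_eq,
                  waFold_lb, waFold_lu, waFold_dw, waFold_ff,
                  PySem.Dict.getD_eq_get?_getD, PySem.Dict.get?_insert]
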